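-- pv_equiv track=rewrite | github.com/jkim439/Coding-Test | Programmers/Lv. 2/70129.py | solution
-- ===== SOURCE A (Python) =====
-- def solution(s):
--     a = 0
--     b = 0
--     while 1:
--         if s == "1":
--             return [a, b]
--         a += 1
--         b += len([c for c in s if c == "0"])
--         s = str(bin(len([c for c in s if c == "1"]))[2:])
-- ===== SOURCE B (Python) =====
-- def trajectory(n):
--     # trajectory of one-counts: [n, popcount(n), ...] down to 1
--     if n == 1:
--         return [1]
--     return [n] + trajectory(bin(n).count("1"))
--
-- def solution(s):
--     if s == "1":
--         return [0, 0]
--     chain = trajectory(s.count("1"))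
--     zeros = s.count("0") + sum(k.bit_length() - bin(k).count("1") for k in chain[:-1])
--     return [len(chain), zeros]
-- ===== Notes on version B (the rewrite author's own statement) =====
-- stated objective: alternative
-- what changed: B first recursively builds the whole trajectory of one-counts as a list, then derives the answer in a separate aggregation pass (length of the list, plus a sum of bit_length-popcount over its elements), instead of A's single while loop that mutates a binary string and two accumulators.
import Mathlib
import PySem

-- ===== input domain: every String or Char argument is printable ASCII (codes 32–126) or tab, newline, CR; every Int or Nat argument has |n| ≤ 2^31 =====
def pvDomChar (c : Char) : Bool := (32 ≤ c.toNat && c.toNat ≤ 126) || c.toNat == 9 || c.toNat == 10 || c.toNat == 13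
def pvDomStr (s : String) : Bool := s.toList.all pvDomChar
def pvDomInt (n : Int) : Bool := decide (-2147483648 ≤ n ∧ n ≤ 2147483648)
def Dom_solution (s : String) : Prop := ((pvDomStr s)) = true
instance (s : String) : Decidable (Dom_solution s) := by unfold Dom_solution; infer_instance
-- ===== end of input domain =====

-- B builds the whole trajectory of one-counts as a list (recursively), then aggregates
-- it in a second pass (length + a sum of bit_length - popcount), instead of A's single
-- accumulator loop over rebuilt binary strings (alternative decomposition).

-- ===== PORT A =====
-- bin(n)[2:] as a list of chars, most significant first (bin(0)[2:] = "0")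
def binCore (n : Nat) : List Char :=
  if _h : n = 0 then []
  else binCore (n / 2) ++ [if n % 2 = 1 then '1' else '0']
decreasing_by exact Nat.div_lt_self (Nat.pos_of_ne_zero _h) one_lt_two

def binStr (n : Nat) : String := if n = 0 then "0" else String.ofList (binCore n)

-- len([c for c in s if c == "0"]) / "1"
def pvCount0 (s : String) : Nat := (s.toList.filter (fun c => c = '0')).length
def pvCount1 (s : String) : Nat := (s.toList.filter (fun c => c = '1')).length

-- the 'while 1' loop; fuel only makes it total, it is never exhausted on Pre_ inputs
def solutionLoop : Nat → String → Int → Int → List Int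
  | 0, _, a, b => [a, b]
  | fuel + 1, s, a, b =>
      if s = "1" then [a, b]
      else solutionLoop fuel (binStr (pvCount1 s)) (a + 1) (b + (pvCount0 s : Int))

def solution (s : String) : List Int := solutionLoop (s.toList.length + 2) s 0 0

-- ===== PORT B =====
-- trajectory(n) of Source B; bin(k).count("1") → PySem.Int.bitCount; fuel only for totality,
-- on Pre_ inputs the start value n ≥ 1 bounds the recursion depth
def trajFuel : Nat → Nat → List Nat
  | 0, n => [n]
  | fuel + 1, n =>
      if n = 1 then [1]
      else n :: trajFuel fuel (PySem.Int.bitCount (n : Int))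

-- k.bit_length() - bin(k).count("1"), one summand of Source B's comprehension
def zTerm (k : Nat) : Int :=
  (PySem.Int.bitLength (k : Int) : Int) - (PySem.Int.bitCount (k : Int) : Int)

def solution_alt (s : String) : List Int :=
  if s = "1" then [0, 0]
  else
    let chain := trajFuel (s.toList.count '1') (s.toList.count '1')
    [(chain.length : Int),
     (s.toList.count '0' : Int) + (chain.dropLast.map zTerm).sum]

-- ===== PRECONDITION & SPEC =====
-- Pre_ excludes strings containing no one-bits, on which A loops forever (never returns)
def Pre_solution (s : String) : Prop := '1' ∈ s.toList
instance (s : String) : Decidable (Pre_solution s) := by unfold Pre_solution; infer_instance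
def pvWitness_solution : String := "110"

def Spec_solution (s : String) (out : List Int) : Prop := out = solution_alt s
instance (s : String) (out : List Int) : Decidable (Spec_solution s out) := by unfold Spec_solution; infer_instance

-- ===== CLAIM =====
def Claim_equal_solution : Prop := ∀ (s : String), Dom_solution s → Pre_solution s → Spec_solution s (solution s)

-- ===== LEMMAS AND PROOFS =====

theorem count1_binCore (n : Nat) :
    (binCore n).count '1' = PySem.Int.bitCount (n : Int) := by
  induction n using Nat.strong_induction_on with
  | _ n ih =>
    rw [binCore]
    by_cases h : n = 0
    · simp [h]
    · have hp : 0 < n := Nat.pos_of_ne_zero h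
      rw [dif_neg h, List.count_append, ih (n / 2) (Nat.div_lt_self hp one_lt_two),
        PySem.Int.bitCount_natCast hp]
      by_cases hm : n % 2 = 1 <;> simp [hm] <;> omega

theorem len_binCore (n : Nat) :
    (binCore n).length = PySem.Int.bitLength (n : Int) := by
  induction n using Nat.strong_induction_on with
  | _ n ih =>
    rw [binCore]
    by_cases h : n = 0
    · simp [h]
    · have hp : 0 < n := Nat.pos_of_ne_zero h
      rw [dif_neg h, List.length_append, ih (n / 2) (Nat.div_lt_self hp one_lt_two),
        PySem.Int.bitLength_natCast hp]
      simp

theorem count0_add_count1_binCore (n : Nat) :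
    (binCore n).count '0' + (binCore n).count '1' = (binCore n).length := by
  induction n using Nat.strong_induction_on with
  | _ n ih =>
    rw [binCore]
    by_cases h : n = 0
    · simp [h]
    · have hp : 0 < n := Nat.pos_of_ne_zero h
      rw [dif_neg h]
      have := ih (n / 2) (Nat.div_lt_self hp one_lt_two)
      by_cases hm : n % 2 = 1 <;> simp [hm, List.count_append] <;> omega

theorem bitCount_pos {n : Nat} (h : 1 ≤ n) : 1 ≤ PySem.Int.bitCount (n : Int) := by
  induction n using Nat.strong_induction_on with
  | _ n ih =>
    rw [PySem.Int.bitCount_natCast (by omega)]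
    by_cases h1 : n = 1
    · simp [h1]
    · have : 1 ≤ n / 2 := by omega
      have := ih (n / 2) (Nat.div_lt_self (by omega) one_lt_two) this
      omega

theorem bitCount_lt {n : Nat} (h : 2 ≤ n) : PySem.Int.bitCount (n : Int) < n := by
  induction n using Nat.strong_induction_on with
  | _ n ih =>
    rw [PySem.Int.bitCount_natCast (by omega)]
    by_cases h2 : n / 2 ≤ 1
    · have h3 : n ≤ 3 := by omega
      interval_cases n <;> decide
    · have := ih (n / 2) (Nat.div_lt_self (by omega) one_lt_two) (by omega)
      omega

theorem bitLength_pos {n : Nat} (h : 1 ≤ n) : 1 ≤ PySem.Int.bitLength (n : Int) := by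
  rw [PySem.Int.bitLength_natCast (by omega)]; omega

theorem binStr_eq_one_iff {n : Nat} (h : 1 ≤ n) : binStr n = "1" ↔ n = 1 := by
  constructor
  · intro he
    by_contra h1
    have h2 : 2 ≤ n := by omega
    have hl : (binStr n).toList.length = (binCore n).length := by
      rw [binStr, if_neg (by omega)]; simp
    have hbl : 2 ≤ PySem.Int.bitLength (n : Int) := by
      rw [PySem.Int.bitLength_natCast (by omega)]
      have : 1 ≤ n / 2 := by omega
      have := bitLength_pos this
      omega
    rw [he] at hl
    rw [len_binCore] at hl
    simp at hl
    omega
  · intro h1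
    subst h1
    rw [binStr, if_neg (by omega), binCore, binCore]
    simp

theorem filter_len_eq_count (l : List Char) (c : Char) :
    (l.filter (fun x => x = c)).length = l.count c := by
  rw [List.count_eq_countP, List.countP_eq_length_filter]
  congr 1

theorem counts_of_binStr {n : Nat} (h : 1 ≤ n) :
    pvCount1 (binStr n) = PySem.Int.bitCount (n : Int) ∧
    (pvCount0 (binStr n) : Int) = zTerm n := by
  have ht : (binStr n).toList = binCore n := by
    rw [binStr, if_neg (by omega)]; simp
  have h1 : pvCount1 (binStr n) = (binCore n).count '1' := by
    rw [pvCount1, ht, filter_len_eq_count]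
  have h0 : pvCount0 (binStr n) = (binCore n).count '0' := by
    rw [pvCount0, ht, filter_len_eq_count]
  refine ⟨by rw [h1, count1_binCore], ?_⟩
  have hs := count0_add_count1_binCore n
  rw [count1_binCore, len_binCore] at hs
  rw [h0, zTerm]
  omega

theorem trajFuel_ne_nil (f n : Nat) : trajFuel f n ≠ [] := by
  cases f <;> simp [trajFuel] <;> split <;> simp

-- A's loop from bin(n) equals B's trajectory aggregation
theorem loop_traj : ∀ n, 1 ≤ n → ∀ f g a b, n ≤ f → n ≤ g →
    solutionLoop f (binStr n) a b =
      [a + ((trajFuel g n).length : Int) - 1,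
       b + ((trajFuel g n).dropLast.map zTerm).sum] := by
  intro n
  induction n using Nat.strong_induction_on with
  | _ n ih =>
    intro hn f g a b hf hg
    obtain ⟨f', rfl⟩ : ∃ f', f = f' + 1 := ⟨f - 1, by omega⟩
    obtain ⟨g', rfl⟩ : ∃ g', g = g' + 1 := ⟨g - 1, by omega⟩
    by_cases h1 : n = 1
    · subst h1
      have : binStr 1 = "1" := (binStr_eq_one_iff (by omega)).mpr rfl
      simp [solutionLoop, trajFuel, this]
    · have h2 : 2 ≤ n := by omega
      have hne : ¬ binStr n = "1" := by rw [binStr_eq_one_iff hn]; exact h1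
      obtain ⟨hc1, hc0⟩ := counts_of_binStr hn
      rw [solutionLoop, if_neg hne, hc1, hc0]
      have hplt : PySem.Int.bitCount (n : Int) < n := bitCount_lt h2
      have hppos : 1 ≤ PySem.Int.bitCount (n : Int) := bitCount_pos hn
      rw [ih _ hplt hppos f' g' (a + 1) (b + zTerm n) (by omega) (by omega)]
      rw [trajFuel, if_neg h1]
      have hnn := trajFuel_ne_nil g' (PySem.Int.bitCount (n : Int))
      rw [List.dropLast_cons_of_ne_nil hnn]
      simp
      constructor <;> ring

-- ===== VERDICT =====
theorem solution_spec : Claim_equal_solution := by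
  intro s _ hpre
  unfold Spec_solution solution solution_alt
  by_cases hs : s = "1"
  · subst hs; rfl
  · rw [if_neg hs]
    have hc : 1 ≤ s.toList.count '1' := List.count_pos_iff.mpr hpre
    have hlen : s.toList.count '1' ≤ s.toList.length := List.count_le_length
    have h1 : pvCount1 s = s.toList.count '1' := filter_len_eq_count _ _
    have h0 : pvCount0 s = s.toList.count '0' := filter_len_eq_count _ _
    rw [show s.toList.length + 2 = (s.toList.length + 1) + 1 from rfl,
      solutionLoop, if_neg hs, h1, h0, zero_add, zero_add]
    rw [loop_traj _ hc _ _ 1 _ (by omega) (le_refl _)]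
    simp
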